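-- pv_equiv track=rewrite | github.com/annedranowski/untangling-number | crossing-reduction/run_variant_sweep.py | apply_flips
-- ===== SOURCE A (Python) =====
-- def flip_crossing_quad(quad):
--     a, b, c, d = quad
--     return [b, c, d, a]
--
-- def apply_flips(pd_list, flipped_indices):
--     idxs_set = set(flipped_indices)
--     out = []
--     for i, quad in enumerate(pd_list):
--         if i in idxs_set:
--             out.append(flip_crossing_quad(quad))
--         else:
--             out.append(list(quad))
--     return out
-- ===== SOURCE B (Python) =====
-- def apply_flips(pd_list, flipped_indices):
--     out = [list(q) for q in pd_list]
--     n = len(out)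
--     for i in flipped_indices:
--         if 0 <= i < n:
--             a, b, c, d = pd_list[i]
--             out[i] = [b, c, d, a]
--     return out
-- ===== Notes on version B (the rewrite author's own statement) =====
-- stated objective: simpler
-- what changed: B copies all quads in one pass and then iterates only over flipped_indices, overwriting the affected positions in place, instead of building a set and testing membership for every element of pd_list.
import Mathlib
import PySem

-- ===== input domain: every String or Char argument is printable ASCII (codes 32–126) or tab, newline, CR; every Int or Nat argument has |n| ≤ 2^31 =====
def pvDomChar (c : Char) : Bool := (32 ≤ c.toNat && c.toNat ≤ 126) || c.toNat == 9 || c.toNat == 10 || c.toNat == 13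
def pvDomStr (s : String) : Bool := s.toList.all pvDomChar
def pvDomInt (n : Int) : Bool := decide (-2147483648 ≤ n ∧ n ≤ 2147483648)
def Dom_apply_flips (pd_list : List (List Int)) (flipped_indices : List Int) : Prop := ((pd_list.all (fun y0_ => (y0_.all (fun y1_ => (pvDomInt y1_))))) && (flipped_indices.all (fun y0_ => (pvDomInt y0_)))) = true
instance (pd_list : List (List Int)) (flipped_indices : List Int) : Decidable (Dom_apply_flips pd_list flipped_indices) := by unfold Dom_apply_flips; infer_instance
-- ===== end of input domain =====

-- B copies all quads once and then walks only flipped_indices, overwriting in place with a bound check; same cost, no set and no per-element membership test.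

-- ===== PORT A =====
-- flip_crossing_quad: unpacks a 4-list and rotates; other lengths raise in Python (excluded by Pre_),
-- the catch-all branch here is never reached under Pre_.
def pvFlipQuad (quad : List Int) : List Int :=
  match quad with
  | [a, b, c, d] => [b, c, d, a]
  | q => q

def apply_flips (pd_list : List (List Int)) (flipped_indices : List Int) : List (List Int) :=
  let idxs_set : PySem.Set Int := PySem.Set.ofList flipped_indices
  (PySem.List.enumerate pd_list).foldl
    (fun out p =>
      if p.1 ∈ idxs_set then out ++ [pvFlipQuad p.2] else out ++ [p.2]) []

-- ===== PORT B =====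
def apply_flips_alt (pd_list : List (List Int)) (flipped_indices : List Int) : List (List Int) :=
  let out := pd_list.map (fun q => q)     -- [list(q) for q in pd_list]
  let n : Int := out.length
  flipped_indices.foldl
    (fun out i =>
      if 0 ≤ i ∧ i < n then out.set i.toNat (pvFlipQuad (pd_list.getD i.toNat [])) else out)
    out

-- ===== PRECONDITION & SPEC =====
-- Pre_ excludes exactly the inputs where Python A raises: a flipped in-range quad whose length ≠ 4
-- makes the tuple-unpacking in flip_crossing_quad raise ValueError (B raises there too).
def Pre_apply_flips (pd_list : List (List Int)) (flipped_indices : List Int) : Prop :=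
  ∀ i ∈ flipped_indices, 0 ≤ i → i < (pd_list.length : Int) → (pd_list.getD i.toNat []).length = 4
instance (pd_list : List (List Int)) (flipped_indices : List Int) : Decidable (Pre_apply_flips pd_list flipped_indices) := by unfold Pre_apply_flips; infer_instance

def pvWitness_apply_flips : List (List Int) × List Int := ([[1, 2, 3, 4], [5, 6, 7, 8]], [1, -3, 7])

def Spec_apply_flips (pd_list : List (List Int)) (flipped_indices : List Int) (out : List (List Int)) : Prop := out = apply_flips_alt pd_list flipped_indices
instance (pd_list : List (List Int)) (flipped_indices : List Int) (out : List (List Int)) : Decidable (Spec_apply_flips pd_list flipped_indices out) := by unfold Spec_apply_flips; infer_instance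

-- ===== CLAIM (what is proved, stated in full; the proofs are below) =====
def Claim_equal_apply_flips : Prop := ∀ (pd_list : List (List Int)) (flipped_indices : List Int), Dom_apply_flips pd_list flipped_indices → Pre_apply_flips pd_list flipped_indices → Spec_apply_flips pd_list flipped_indices (apply_flips pd_list flipped_indices)

-- ===== LEMMAS AND PROOFS =====

-- A's loop is a map over the enumeration.
theorem apply_flips_eq_map (pd_list : List (List Int)) (flipped_indices : List Int) :
    apply_flips pd_list flipped_indices =
      (PySem.List.enumerate pd_list).map
        (fun p => if p.1 ∈ flipped_indices then pvFlipQuad p.2 else p.2) := by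
  unfold apply_flips
  have hfun : (fun (out : List (List Int)) (p : Int × List Int) =>
      if p.1 ∈ PySem.Set.ofList flipped_indices then out ++ [pvFlipQuad p.2] else out ++ [p.2])
    = fun out p => out ++ [if p.1 ∈ flipped_indices then pvFlipQuad p.2 else p.2] := by
    funext out p
    by_cases h : p.1 ∈ flipped_indices <;> simp [PySem.Set.mem_ofList, h]
  simp only [hfun, PySem.List.foldl_append_singleton_eq_map, List.nil_append]

-- Invariant of B's fold: length is preserved and each position holds the flipped quad
-- iff its index occurs among the processed indices.
theorem alt_foldl_inv (pd_list : List (List Int)) (fl : List Int) (acc : List (List Int))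
    (hlen : acc.length = pd_list.length) :
    (fl.foldl (fun out i =>
        if 0 ≤ i ∧ i < (pd_list.length : Int) then
          out.set i.toNat (pvFlipQuad (pd_list.getD i.toNat [])) else out) acc).length
        = pd_list.length ∧
    ∀ j : Nat, j < pd_list.length →
      (fl.foldl (fun out i =>
        if 0 ≤ i ∧ i < (pd_list.length : Int) then
          out.set i.toNat (pvFlipQuad (pd_list.getD i.toNat [])) else out) acc).getD j []
      = if (j : Int) ∈ fl then pvFlipQuad (pd_list.getD j []) else acc.getD j [] := by
  induction fl generalizing acc with
  | nil => simpa using hlen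
  | cons i fl ih =>
    simp only [List.foldl_cons]
    by_cases hi : 0 ≤ i ∧ i < (pd_list.length : Int)
    · have hset : (acc.set i.toNat (pvFlipQuad (pd_list.getD i.toNat []))).length = pd_list.length := by
        simpa using hlen
      obtain ⟨h1, h2⟩ := ih _ hset
      refine ⟨by simpa [hi] using h1, fun j hj => ?_⟩
      rw [if_pos hi]
      rw [h2 j hj]
      by_cases hjf : (j : Int) ∈ fl
      · simp [hjf]
      · have hji : (j : Int) = i ∨ (j : Int) ≠ i := em _
        rcases hji with hji | hji
        · have hij : i.toNat = j := by omega
          simp [hjf, ← hji, List.getD, hlen, hj]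
        · have hne : i.toNat ≠ j := by omega
          simp [hjf, hji, List.getD, List.getElem?_set_ne hne]
    · obtain ⟨h1, h2⟩ := ih _ hlen
      refine ⟨by simpa [hi] using h1, fun j hj => ?_⟩
      rw [if_neg hi, h2 j hj]
      have hji : (j : Int) ≠ i := by
        intro h; apply hi; constructor <;> omega
      by_cases hjf : (j : Int) ∈ fl <;> simp [hjf, hji]

theorem apply_flips_spec : Claim_equal_apply_flips := by
  intro pd fl _ hpre
  unfold Spec_apply_flips
  rw [apply_flips_eq_map]
  unfold apply_flips_alt
  simp only [List.map_id_fun', id]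
  obtain ⟨hlen, hget⟩ := alt_foldl_inv pd fl pd rfl
  apply List.ext_getElem
  · simpa [PySem.List.length_enumerate] using hlen.symm
  · intro j hj₁ hj₂
    have hjpd : j < pd.length := by simpa [PySem.List.length_enumerate] using hj₁
    have hmap := hget j hjpd
    have hje : j < (PySem.List.enumerate pd).length := by
      simpa [PySem.List.length_enumerate] using hjpd
    rw [← List.getD_eq_getElem _ [] , ← List.getD_eq_getElem _ []]
    rw [hmap]
    have henu : (PySem.List.enumerate pd)[j] = ((j : Int), pd[j]) := by
      simpa using PySem.List.getElem_enumerate (xs := pd) (s := 0) (k := j) (h := hje)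
    rw [List.getD_eq_getElem _ _ (by simpa using hje), List.getElem_map, henu]
    simp [List.getD, List.getElem?_eq_getElem hjpd]
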